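-- pv_equiv track=rewrite | github.com/richzli/codeforces | 604-2/A.py | generate
-- ===== SOURCE A (Python) =====
-- def getnot(lets):
--     if lets == "a":
--         return "b"
--     elif lets == "b" or lets == "c":
--         return "a"
--     elif lets == "ab" or lets == "ba" or lets == "aa" or lets == "bb":
--         return "c"
--     elif lets == "bc" or lets == "cb" or lets == "cc":
--         return "a"
--     elif lets == "ac" or lets == "ca":
--         return "b"
--     else:
--         return "a"
--
-- def generate(length, l, r):
--     ret = ""
--     prev = l
--     for i in range(length):
--         if i != length-1:
--             ll = getnot(prev)
--             ret += ll
--             prev = ll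
--         else:
--             ll = getnot(prev+r)
--             ret += ll
--
--     return ret
-- ===== SOURCE B (Python) =====
-- def getnot(lets):
--     if lets == "a":
--         return "b"
--     elif lets == "b" or lets == "c":
--         return "a"
--     elif lets == "ab" or lets == "ba" or lets == "aa" or lets == "bb":
--         return "c"
--     elif lets == "bc" or lets == "cb" or lets == "cc":
--         return "a"
--     elif lets == "ac" or lets == "ca":
--         return "b"
--     else:
--         return "a"
--
-- def generate(length, l, r):
--     if length <= 0:
--         return ""
--     if length == 1:
--         return getnot(l + r)
--     s0 = getnot(l)
--     s1 = getnot(s0)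
--     s2 = "b" if s1 == "a" else "a"
--     m = length - 1
--     middle = (s0 + (s1 + s2) * m)[:m]
--     last = s0 if m == 1 else (s1 if m % 2 == 0 else s2)
--     return middle + getnot(last + r)
-- ===== Notes on version B (the rewrite author's own statement) =====
-- stated objective: faster
-- what changed: A threads prev through getnot once per character in a Python loop; B computes the result in closed form: after the first two characters the sequence strictly alternates, so the first length-1 characters are the first character plus a repeated two-char pattern sliced to length-1, and the final character is one getnot call on the parity-selected last middle character.
import Mathlib
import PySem

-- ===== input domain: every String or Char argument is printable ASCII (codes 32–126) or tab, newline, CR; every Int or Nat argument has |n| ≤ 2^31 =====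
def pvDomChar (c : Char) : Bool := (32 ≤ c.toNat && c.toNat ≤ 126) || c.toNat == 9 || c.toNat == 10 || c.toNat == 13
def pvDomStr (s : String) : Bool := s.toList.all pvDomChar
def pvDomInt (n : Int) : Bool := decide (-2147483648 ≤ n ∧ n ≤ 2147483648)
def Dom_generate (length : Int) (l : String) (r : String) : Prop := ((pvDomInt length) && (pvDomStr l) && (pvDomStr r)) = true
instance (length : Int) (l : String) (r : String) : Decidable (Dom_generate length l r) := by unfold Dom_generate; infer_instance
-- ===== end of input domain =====

-- B replaces A's per-character prev-threading loop by a closed-form alternation (first char,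
-- then a repeated two-char pattern sliced to length-1) plus one final getnot call.

-- ===== PORT A =====
def getnot (lets : String) : String :=
  if lets = "a" then "b"
  else if lets = "b" ∨ lets = "c" then "a"
  else if lets = "ab" ∨ lets = "ba" ∨ lets = "aa" ∨ lets = "bb" then "c"
  else if lets = "bc" ∨ lets = "cb" ∨ lets = "cc" then "a"
  else if lets = "ac" ∨ lets = "ca" then "b"
  else "a"

def generate (length : Int) (l : String) (r : String) : String :=
  ((PySem.List.pyRange 0 length 1).foldl
    (fun (st : String × String) i =>
      if i ≠ length - 1 then
        let ll := getnot st.2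
        (st.1 ++ ll, ll)
      else
        let ll := getnot (st.2 ++ r)
        (st.1 ++ ll, st.2))
    ("", l)).1

-- ===== PORT B =====
-- Python's 's * n' (string repetition, n ≥ 0) ported by hand; exact for n ≥ 0
def strRepeat (s : String) : Nat → String
  | 0 => ""
  | n + 1 => s ++ strRepeat s n

def generate_alt (length : Int) (l : String) (r : String) : String :=
  if length ≤ 0 then ""
  else if length = 1 then getnot (l ++ r)
  else
    let s0 := getnot l
    let s1 := getnot s0
    let s2 := if s1 = "a" then "b" else "a"
    let m := length - 1
    -- (s0 + (s1 + s2) * m)[:m]  — '* m' via strRepeat with m.toNat (exact, m ≥ 1 here)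
    let middle := PySem.Str.slice (s0 ++ strRepeat (s1 ++ s2) m.toNat) none (some m)
    let last := if m = 1 then s0 else if PySem.Int.mod m 2 = 0 then s1 else s2
    middle ++ getnot (last ++ r)

-- ===== PRECONDITION & SPEC =====
def Spec_generate (length : Int) (l : String) (r : String) (out : String) : Prop := out = generate_alt length l r
instance (length : Int) (l : String) (r : String) (out : String) : Decidable (Spec_generate length l r out) := by unfold Spec_generate; infer_instance

-- ===== CLAIM (what is proved, stated in full; the proofs are below) =====
def Claim_equal_generate : Prop := ∀ (length : Int) (l : String) (r : String), Dom_generate length l r → Spec_generate length l r (generate length l r)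

-- ===== LEMMAS AND PROOFS =====

-- the string appended/kept at each middle step of A's loop
def midStep (st : String × String) : String × String := (st.1 ++ getnot st.2, getnot st.2)

-- prevSeq l j = A's prev after j middle steps
def prevSeq (l : String) : Nat → String
  | 0 => l
  | j + 1 => getnot (prevSeq l j)

-- accStr l j = A's ret after j middle steps
def accStr (l : String) : Nat → String
  | 0 => ""
  | j + 1 => accStr l j ++ prevSeq l (j + 1)

theorem foldl_const_iterate {α β : Type} (S : α → α) (xs : List β) (st : α) :
    xs.foldl (fun s _ => S s) st = S^[xs.length] st := by
  induction xs generalizing st with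
  | nil => rfl
  | cons x xs ih => simp [List.foldl_cons, ih, Function.iterate_succ_apply]

theorem iterate_midStep (l : String) (j : Nat) (acc : String) :
    midStep^[j] (acc, l) = (acc ++ accStr l j, prevSeq l j) := by
  induction j with
  | zero => simp [accStr, prevSeq]
  | succ j ih =>
      rw [Function.iterate_succ_apply', ih]
      simp [midStep, accStr, prevSeq, String.append_assoc]

theorem getnot_cases (s : String) : getnot s = "a" ∨ getnot s = "b" ∨ getnot s = "c" := by
  unfold getnot; split_ifs <;> simp

theorem prevSeq_closed (l : String) (s1 s2 : String)
    (h1 : prevSeq l 2 = s1) (h12 : getnot s1 = s2) (h21 : getnot s2 = s1) (j : Nat) :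
    prevSeq l (j + 2) = if j % 2 = 0 then s1 else s2 := by
  induction j with
  | zero => simpa using h1
  | succ j ih =>
      have : prevSeq l (j + 3) = getnot (prevSeq l (j + 2)) := rfl
      rw [this, ih]
      rcases Nat.even_or_odd j with he | ho
      · have hj : j % 2 = 0 := Nat.even_iff.mp he
        have hj1 : (j + 1) % 2 = 1 := by omega
        simp [hj, hj1, h12]
      · have hj : j % 2 = 1 := Nat.odd_iff.mp ho
        have hj1 : (j + 1) % 2 = 0 := by omega
        simp [hj, hj1, h21]

-- the alternating char list c1 c2 c1 c2 …
def altL (c1 c2 : Char) (j : Nat) : List Char :=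
  (List.range j).map (fun i => if i % 2 = 0 then c1 else c2)

theorem altL_succ (c1 c2 : Char) (j : Nat) :
    altL c1 c2 (j + 1) = altL c1 c2 j ++ [if j % 2 = 0 then c1 else c2] := by
  simp [altL, List.range_succ]

theorem altL_add_two (c1 c2 : Char) (j : Nat) :
    altL c1 c2 (j + 2) = c1 :: c2 :: altL c1 c2 j := by
  apply List.ext_getElem
  · simp [altL]
  · intro i h1 h2
    rcases i with _ | _ | i <;> simp [altL]
    have : (i + 1 + 1) % 2 = i % 2 := by omega
    rw [this]

theorem take_flatten_replicate (c1 c2 : Char) (n j : Nat) (h : j ≤ 2 * n) :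
    ((List.replicate n [c1, c2]).flatten).take j = altL c1 c2 j := by
  induction n generalizing j with
  | zero =>
      have : j = 0 := by omega
      simp [this, altL]
  | succ n ih =>
      match j, h with
      | 0, _ => simp [altL]
      | 1, _ => simp [List.replicate_succ, altL, List.range_succ]
      | (j + 2), h =>
          have hj : j ≤ 2 * n := by omega
          rw [List.replicate_succ, altL_add_two]
          simp [ih j hj]

theorem strRepeat_toList (s : String) (n : Nat) :
    (strRepeat s n).toList = (List.replicate n s.toList).flatten := by
  induction n with
  | zero => simp [strRepeat]
  | succ n ih => simp [strRepeat, List.replicate_succ, ih]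

theorem accStr_toList (l : String) (c0 c1 c2 : Char) (s1 s2 : String)
    (h0 : (prevSeq l 1).toList = [c0])
    (hcl : ∀ j, prevSeq l (j + 2) = if j % 2 = 0 then s1 else s2)
    (hs1 : s1.toList = [c1]) (hs2 : s2.toList = [c2]) (j : Nat) :
    (accStr l (j + 1)).toList = c0 :: altL c1 c2 j := by
  induction j with
  | zero => simp [accStr, h0, altL]
  | succ j ih =>
      have : accStr l (j + 2) = accStr l (j + 1) ++ prevSeq l (j + 2) := rfl
      rw [this]
      rw [altL_succ]
      rcases Nat.even_or_odd j with he | ho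
      · have hj : j % 2 = 0 := Nat.even_iff.mp he
        simp [ih, hcl j, hj, hs1]
      · have hj : j % 2 = 1 := Nat.odd_iff.mp ho
        simp [ih, hcl j, hj, hs2]

-- ===== VERDICT (by name: the statement is the Claim_ definition above) =====
-- helper facts used by the main proof
theorem int_mod_two_natCast (j : Nat) : PySem.Int.mod ((j : Int)) 2 = ((j % 2 : Nat) : Int) := by
  exact_mod_cast PySem.Int.mod_natCast j 2

-- A's loop: the prefix of middle iterations, then the final step
theorem generate_eq_accStr (length : Int) (l r : String) (h2 : 2 ≤ length) :
    generate length l r = accStr l (length - 1).toNat ++ getnot (prevSeq l (length - 1).toNat ++ r) := by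
  unfold generate
  have hb : (0 : Int) ≤ length - 1 := by omega
  have hsplit : PySem.List.pyRange 0 length 1
      = PySem.List.pyRange 0 (length - 1) 1 ++ [length - 1] := by
    have := PySem.List.pyRange_one_succ_right (a := (0 : Int)) (b := length - 1) (by omega)
    simpa using this
  rw [hsplit, List.foldl_append]
  have hpre : (PySem.List.pyRange 0 (length - 1) 1).foldl
      (fun (st : String × String) i =>
        if i ≠ length - 1 then
          let ll := getnot st.2
          (st.1 ++ ll, ll)
        else
          let ll := getnot (st.2 ++ r)
          (st.1 ++ ll, st.2))
      ("", l)
      = ("" ++ accStr l (length - 1).toNat, prevSeq l (length - 1).toNat) := by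
    have hcong : ∀ i ∈ PySem.List.pyRange 0 (length - 1) 1, ∀ st : String × String,
        (if i ≠ length - 1 then
          let ll := getnot st.2
          (st.1 ++ ll, ll)
        else
          let ll := getnot (st.2 ++ r)
          (st.1 ++ ll, st.2)) = midStep st := by
      intro i hi st
      have hlt : i < length - 1 := (PySem.List.mem_pyRange_one.mp hi).2
      rw [if_pos (by omega)]
      rfl
    rw [PySem.List.foldl_congr_mem'
      (f := fun (st : String × String) i =>
        if i ≠ length - 1 then
          let ll := getnot st.2
          (st.1 ++ ll, ll)
        else
          let ll := getnot (st.2 ++ r)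
          (st.1 ++ ll, st.2))
      (g := fun (st : String × String) _ => midStep st)
      (init := (("", l) : String × String))
      (l := PySem.List.pyRange 0 (length - 1) 1) hcong]
    rw [foldl_const_iterate midStep _ ("", l)]
    rw [PySem.List.length_pyRange_one]
    simpa using iterate_midStep l (length - 1).toNat ""
  rw [hpre]
  simp

theorem main_case (length : Int) (l r : String) (h2 : 2 ≤ length) :
    generate length l r = generate_alt length l r := by
  rw [generate_eq_accStr length l r h2]
  unfold generate_alt
  rw [if_neg (by omega), if_neg (by omega)]
  simp only []
  -- name B's quantities
  set s0 := getnot l with hs0def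
  set s1 := getnot s0 with hs1def
  set s2 := (if s1 = "a" then "b" else "a") with hs2def
  -- concrete character facts
  obtain ⟨c0, c1, c2, h0L, h1L, h2L, h12, h21⟩ :
      ∃ c0 c1 c2 : Char, s0.toList = [c0] ∧ s1.toList = [c1] ∧ s2.toList = [c2] ∧
        getnot s1 = s2 ∧ getnot s2 = s1 := by
    rcases getnot_cases l with h | h | h <;>
      rw [← hs0def] at h <;> simp only [hs2def, hs1def, h]
    · exact ⟨'a', 'b', 'a', by decide, by decide, by decide, by decide, by decide⟩
    · exact ⟨'b', 'a', 'b', by decide, by decide, by decide, by decide, by decide⟩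
    · exact ⟨'c', 'a', 'b', by decide, by decide, by decide, by decide, by decide⟩
  have hpb : ∀ j, prevSeq l (j + 2) = if j % 2 = 0 then s1 else s2 :=
    prevSeq_closed l s1 s2 rfl h12 h21
  obtain ⟨j, hj⟩ : ∃ j : Nat, (length - 1).toNat = j + 1 := ⟨(length - 1).toNat - 1, by omega⟩
  have hcast : length - 1 = ((j + 1 : Nat) : Int) := by omega
  -- prev = last
  have hprev : prevSeq l (length - 1).toNat
      = (if length - 1 = 1 then s0 else if PySem.Int.mod (length - 1) 2 = 0 then s1 else s2) := by
    rw [hj]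
    rcases j with _ | j
    · rw [if_pos (by omega)]
      rfl
    · rw [if_neg (by omega), hpb j]
      rw [hcast, int_mod_two_natCast]
      have hm : (j + 1 + 1) % 2 = j % 2 := by omega
      rw [hm]
      rcases Nat.even_or_odd j with he | ho
      · have : j % 2 = 0 := Nat.even_iff.mp he
        simp [this]
      · have : j % 2 = 1 := Nat.odd_iff.mp ho
        simp [this]
  -- ret prefix = middle
  have hmid : accStr l (length - 1).toNat
      = PySem.Str.slice (s0 ++ strRepeat (s1 ++ s2) (length - 1).toNat) none (some (length - 1)) := by
    apply String.toList_injective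
    rw [PySem.Str.toList_slice]
    show (accStr l (length - 1).toNat).toList
        = PySem.List.slice (s0 ++ strRepeat (s1 ++ s2) (length - 1).toNat).toList none
            (some (length - 1))
    rw [PySem.List.slice_to _ (by omega : (0:Int) ≤ length - 1)]
    rw [hj]
    rw [accStr_toList l c0 c1 c2 s1 s2 (by simpa [prevSeq] using h0L) hpb h1L h2L j]
    have hrep : (s0 ++ strRepeat (s1 ++ s2) (j + 1)).toList
        = c0 :: (List.replicate (j + 1) [c1, c2]).flatten := by
      simp [strRepeat_toList, h0L, h1L, h2L]
    rw [hrep, List.take_succ_cons, take_flatten_replicate c1 c2 (j + 1) j (by omega)]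
  rw [hprev, hmid]

theorem generate_spec : Claim_equal_generate := by
  intro length l r _
  unfold Spec_generate
  rcases (by omega : length ≤ 0 ∨ length = 1 ∨ 2 ≤ length) with h0 | h1 | h2
  · unfold generate generate_alt
    rw [PySem.List.pyRange_one_eq_nil h0, if_pos h0]
    rfl
  · subst h1
    unfold generate generate_alt
    have : PySem.List.pyRange 0 1 1 = [0] := by
      simpa using PySem.List.pyRange_one_singleton (0 : Int)
    rw [this]
    norm_num
  · exact main_case length l r h2
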